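-- pv_equiv track=rewrite | github.com/akula/pj | strip.py | checkio_strip
-- ===== SOURCE A (Python) =====
-- def checkio_strip(line):
--     s = []
--     for i in line.split(' '):
--         if i == '' :
--             continue
--         else:
--             s.append(i)
--     return ' '.join(s)
-- ===== SOURCE B (Python) =====
-- def checkio_strip(line):
--     buf = []
--     pending = False
--     for c in line:
--         if c == ' ':
--             if buf:
--                 pending = True
--         else:
--             if pending:
--                 buf.append(' ')
--                 pending = False
--             buf.append(c)
--     return ''.join(buf)
-- ===== Notes on version B (the rewrite author's own statement) =====
-- stated objective: alternative
-- what changed: Replaced split(' ')/filter/join with a single streaming pass over the characters maintaining a buffer and a pending-space flag.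
import Mathlib
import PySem

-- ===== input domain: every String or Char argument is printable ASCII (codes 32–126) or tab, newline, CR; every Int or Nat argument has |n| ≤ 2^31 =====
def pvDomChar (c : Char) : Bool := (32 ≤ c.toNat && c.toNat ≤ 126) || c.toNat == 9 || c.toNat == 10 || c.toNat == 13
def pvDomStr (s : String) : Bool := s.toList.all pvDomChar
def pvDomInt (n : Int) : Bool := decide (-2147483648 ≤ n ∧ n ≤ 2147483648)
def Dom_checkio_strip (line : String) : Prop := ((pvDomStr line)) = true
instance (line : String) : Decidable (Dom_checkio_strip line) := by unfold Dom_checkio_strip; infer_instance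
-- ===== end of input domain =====

-- B replaces A's split(' ')/filter/join with a single streaming pass keeping a buffer and a
-- pending-space flag (alternative decomposition, same O(n) cost); proved to return the same string.


-- ===== PORT A =====
-- line.split(' '), skip empty pieces, ' '.join — on the char-list side via PySem.Chars.
def checkio_strip (line : String) : String :=
  let parts := PySem.Chars.splitOn line.toList [' ']
  let s := parts.foldl (fun s i => if i = [] then s else s ++ [i]) []
  String.ofList (PySem.Chars.join [' '] s)

-- ===== PORT B =====
-- one pass: buffer + pending-space flag (Source B's loop body, step for step)
def pvStep (st : List Char × Bool) (c : Char) : List Char × Bool :=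
  if c = ' ' then
    (st.1, if st.1 = [] then st.2 else true)
  else
    if st.2 then (st.1 ++ [' ', c], false) else (st.1 ++ [c], false)

def checkio_strip_alt (line : String) : String :=
  String.ofList ((line.toList.foldl pvStep ([], false)).1)

-- ===== PRECONDITION & SPEC =====
def Spec_checkio_strip (line : String) (out : String) : Prop := out = checkio_strip_alt line
instance (line : String) (out : String) : Decidable (Spec_checkio_strip line out) := by unfold Spec_checkio_strip; infer_instance

-- ===== CLAIM (what is proved, stated in full; the proofs are below) =====
def Claim_equal_checkio_strip : Prop := ∀ (line : String), Dom_checkio_strip line → Spec_checkio_strip line (checkio_strip line)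

-- ===== LEMMAS AND PROOFS =====

-- reference form of splitOn with the fuel removed (single-char separator ' ')
def pvFsp : List Char → List Char → List (List Char)
  | [], cur => [cur.reverse]
  | c :: rest, cur => if c = ' ' then cur.reverse :: pvFsp rest [] else pvFsp rest (c :: cur)

-- canonical collapsed output: before the first word / inside-or-after a word (pending flag)
def pvOutPost : List Char → Bool → List Char
  | [], _ => []
  | c :: rest, p =>
    if c = ' ' then pvOutPost rest true
    else (if p then [' '] else []) ++ c :: pvOutPost rest false

def pvOutPre : List Char → List Char
  | [] => []
  | c :: rest => if c = ' ' then pvOutPre rest else c :: pvOutPost rest false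

lemma pv_go_eq (fuel : Nat) : ∀ (l cur : List Char) (hacc : List (List Char)),
    l.length < fuel →
    PySem.Chars.splitOn.go [' '] fuel l cur hacc = hacc.reverse ++ pvFsp l cur := by
  induction fuel with
  | zero => intro l cur hacc h; omega
  | succ n ih =>
    intro l cur hacc h
    cases l with
    | nil => simp [PySem.Chars.splitOn.go, pvFsp]
    | cons c rest =>
      by_cases hc : c = ' '
      · subst hc
        have hgo : PySem.Chars.splitOn.go [' '] (n + 1) (' ' :: rest) cur hacc
            = PySem.Chars.splitOn.go [' '] n rest [] (cur.reverse :: hacc) := by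
          simp [PySem.Chars.splitOn.go, List.isPrefixOf]
        rw [hgo, ih rest [] (cur.reverse :: hacc) (by simpa using Nat.lt_of_succ_lt_succ h)]
        simp [pvFsp]
      · have hgo : PySem.Chars.splitOn.go [' '] (n + 1) (c :: rest) cur hacc
            = PySem.Chars.splitOn.go [' '] n rest (c :: cur) hacc := by
          have hp : (([' '] : List Char).isPrefixOf (c :: rest)) = false := by
            simp [List.isPrefixOf]
            exact fun h' => hc h'.symm
          simp [PySem.Chars.splitOn.go, hp]
        rw [hgo, ih rest (c :: cur) hacc (by simpa using Nat.lt_of_succ_lt_succ h)]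
        simp [pvFsp, hc]

lemma pv_splitOn_eq (cs : List Char) : PySem.Chars.splitOn cs [' '] = pvFsp cs [] := by
  have := pv_go_eq (cs.length + 1) cs [] [] (by omega)
  simpa [PySem.Chars.splitOn] using this

-- outPost with a pending space is outPre with one leading ' ' (when anything follows)
lemma pv_post_true (cs : List Char) :
    pvOutPost cs true = if pvOutPre cs = [] then [] else ' ' :: pvOutPre cs := by
  induction cs with
  | nil => simp [pvOutPost, pvOutPre]
  | cons c rest ih =>
    by_cases hc : c = ' '
    · subst hc; simpa [pvOutPost, pvOutPre] using ih
    · simp [pvOutPost, pvOutPre, hc]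

lemma pv_join_cons2 (x y : List Char) (t : List (List Char)) :
    PySem.Chars.join [' '] (x :: y :: t) = x ++ [' '] ++ PySem.Chars.join [' '] (y :: t) := by
  simp [PySem.Chars.join, List.intercalate, List.intersperse]

lemma pv_join_singleton (x : List Char) : PySem.Chars.join [' '] [x] = x := by
  simp [PySem.Chars.join, List.intercalate]

-- A's join-of-nonempty-pieces equals the canonical collapsed output
lemma pv_A_eq : ∀ (cs : List Char),
    (PySem.Chars.join [' ']
      ((pvFsp cs []).filter (fun i => !decide (i = []))) = pvOutPre cs) ∧
    (∀ cur : List Char, cur ≠ [] →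
      PySem.Chars.join [' ']
        ((pvFsp cs cur).filter (fun i => !decide (i = []))) = cur.reverse ++ pvOutPost cs false) := by
  intro cs
  induction cs with
  | nil =>
    constructor
    · simp [pvFsp, pvOutPre, PySem.Chars.join, List.intercalate]
    · intro cur hcur
      simp [pvFsp, pvOutPost, PySem.Chars.join, List.intercalate, hcur]
  | cons c rest ih =>
    have hpre := ih.1
    have hpost := ih.2
    constructor
    · by_cases hc : c = ' '
      · subst hc; simpa [pvFsp, pvOutPre] using hpre
      · have := hpost [c] (by simp)
        simpa [pvFsp, pvOutPre, hc] using this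
    · intro cur hcur
      by_cases hc : c = ' '
      · subst hc
        simp only [pvFsp, pvOutPost]
        simp only [if_true]
        have hrev : cur.reverse ≠ [] := by simpa using hcur
        have hflt : List.filter (fun i => !decide (i = [])) (cur.reverse :: pvFsp rest [])
            = cur.reverse :: List.filter (fun i => !decide (i = [])) (pvFsp rest []) := by
          simp [hcur]
        rw [pv_post_true, hflt]
        by_cases hemp : ((pvFsp rest []).filter (fun i => !decide (i = []))) = []
        · have hpe : pvOutPre rest = [] := by rw [← hpre, hemp]; rfl
          rw [hemp, hpe, pv_join_singleton]
          simp
        · obtain ⟨w, ws, hw⟩ := List.exists_cons_of_ne_nil hemp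
          have hpre' : pvOutPre rest ≠ [] := by
            rw [← hpre, hw]
            have hwne : w ≠ [] := by
              have : w ∈ (pvFsp rest []).filter (fun i => !decide (i = [])) := by
                rw [hw]; exact List.mem_cons_self
              simpa using (List.of_mem_filter this)
            cases ws with
            | nil => simpa [pv_join_singleton] using hwne
            | cons y t => simp [pv_join_cons2, hwne]
          rw [hw, pv_join_cons2, if_neg hpre']
          rw [hw] at hpre
          rw [hpre]
          simp
      · have := hpost (c :: cur) (by simp)
        simpa [pvFsp, pvOutPost, hc] using this

-- B's fold equals the canonical collapsed output
lemma pv_B_post : ∀ (cs : List Char) (buf : List Char) (p : Bool), buf ≠ [] →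
    (cs.foldl pvStep (buf, p)).1 = buf ++ pvOutPost cs p := by
  intro cs
  induction cs with
  | nil => intro buf p h; simp [pvOutPost]
  | cons c rest ih =>
    intro buf p h
    by_cases hc : c = ' '
    · subst hc
      simp only [List.foldl_cons, pvStep, if_neg h, pvOutPost]
      exact ih buf true h
    · cases p with
      | false =>
        simp only [List.foldl_cons, pvStep, if_neg hc, Bool.false_eq_true, if_false, pvOutPost]
        rw [ih (buf ++ [c]) false (by simp)]
        simp
      | true =>
        simp only [List.foldl_cons, pvStep, if_neg hc, pvOutPost]
        simp only [if_true]
        rw [ih (buf ++ [' ', c]) false (by simp)]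
        simp

lemma pv_B_pre : ∀ (cs : List Char),
    (cs.foldl pvStep ([], false)).1 = pvOutPre cs := by
  intro cs
  induction cs with
  | nil => simp [pvOutPre]
  | cons c rest ih =>
    by_cases hc : c = ' '
    · subst hc
      simpa [pvStep, pvOutPre] using ih
    · simp only [List.foldl_cons, pvStep, if_neg hc, Bool.false_eq_true, if_false, pvOutPre]
      rw [show (([] : List Char) ++ [c]) = [c] from rfl, pv_B_post rest [c] false (by simp)]
      simp

-- A's accumulator loop is a filter
lemma pv_fold_filter (parts : List (List Char)) :
    parts.foldl (fun s i => if i = [] then s else s ++ [i]) [] =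
      parts.filter (fun i => !decide (i = [])) := by
  have hfun : (fun (s : List (List Char)) (i : List Char) => if i = [] then s else s ++ [i]) =
      (fun s i => if (!decide (i = [])) = true then s ++ [id i] else s) := by
    funext s i; by_cases h : i = [] <;> simp [h]
  rw [hfun, PySem.List.foldl_append_if (fun i => !decide (i = [])) id parts []]
  simp

-- ===== VERDICT (by name: the statement is the Claim_ definition above) =====
theorem checkio_strip_spec : Claim_equal_checkio_strip := by
  intro line _
  unfold Spec_checkio_strip checkio_strip checkio_strip_alt
  simp only [pv_splitOn_eq, pv_fold_filter, (pv_A_eq line.toList).1, pv_B_pre]
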